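-- pv_equiv track=rewrite | github.com/zhangkaixu/isan | isan/tagging/semi_inc_segger.py | actions_to_result
-- ===== SOURCE A (Python) =====
-- def actions_to_result(actions,raw):
--     sen=[]
--     cache=''
--     for c,a in zip(raw,actions[1:]):
--         cache+=c
--         if a=='s':
--             sen.append(cache)
--             cache=''
--     return sen
-- ===== SOURCE B (Python) =====
-- def actions_to_result(actions, raw):
--     acts = actions[1:]
--     n = min(len(raw), len(acts))
--     cuts = [i for i in range(n) if acts[i] == 's']
--     words = []
--     prev = 0
--     for i in cuts:
--         words.append(raw[prev:i + 1])
--         prev = i + 1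
--     return words
-- ===== Notes on version B (the rewrite author's own statement) =====
-- stated objective: alternative
-- what changed: B first collects the cut indices (positions whose action is 's') in one scan and then builds the words by slicing raw between consecutive cut points, instead of A's single loop accumulating a character cache.
import Mathlib
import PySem

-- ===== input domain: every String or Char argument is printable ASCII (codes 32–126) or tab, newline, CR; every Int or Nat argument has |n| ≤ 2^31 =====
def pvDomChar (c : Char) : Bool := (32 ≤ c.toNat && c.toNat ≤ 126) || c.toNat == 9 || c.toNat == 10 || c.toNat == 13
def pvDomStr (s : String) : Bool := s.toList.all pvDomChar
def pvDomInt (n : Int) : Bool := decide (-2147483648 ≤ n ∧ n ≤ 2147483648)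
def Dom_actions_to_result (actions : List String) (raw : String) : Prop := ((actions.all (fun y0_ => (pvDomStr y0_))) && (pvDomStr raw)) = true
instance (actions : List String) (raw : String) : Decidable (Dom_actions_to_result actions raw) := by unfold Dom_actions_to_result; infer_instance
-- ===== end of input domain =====

-- B collects the cut indices first, then slices raw between consecutive cut points (alternative decomposition, same cost).

-- ===== PORT A =====
-- A's loop over zip(raw, actions[1:]) with state (sen, cache); cache kept as List Char per PySem convention.
def actions_to_result (actions : List String) (raw : String) : List String :=
  let st := (List.zip raw.toList (actions.drop 1)).foldl
    (fun (st : List String × List Char) ca =>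
      let cache := st.2 ++ [ca.1]
      if ca.2 = "s" then (st.1 ++ [String.mk cache], []) else (st.1, cache))
    ([], [])
  st.1

-- ===== PORT B =====
-- the 'for i in cuts' loop of Source B, consuming cuts with current prev
def bGo (full : List Char) : List Nat → Nat → List String
  | [], _ => []
  | i :: is, prev => String.mk ((full.drop prev).take (i + 1 - prev)) :: bGo full is (i + 1)

def actions_to_result_alt (actions : List String) (raw : String) : List String :=
  let acts := actions.drop 1
  let cs := raw.toList
  let n := min cs.length acts.length
  let cuts := (List.range n).filter (fun i => acts.getD i "" = "s")
  bGo cs cuts 0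

-- ===== PRECONDITION & SPEC =====
def Spec_actions_to_result (actions : List String) (raw : String) (out : List String) : Prop := out = actions_to_result_alt actions raw
instance (actions : List String) (raw : String) (out : List String) : Decidable (Spec_actions_to_result actions raw out) := by unfold Spec_actions_to_result; infer_instance

-- ===== CLAIM (what is proved, stated in full; the proofs are below) =====
def Claim_equal_actions_to_result : Prop := ∀ (actions : List String) (raw : String), Dom_actions_to_result actions raw → Spec_actions_to_result actions raw (actions_to_result actions raw)

-- ===== LEMMAS AND PROOFS =====

-- common specification: segment cs by as, with pending cache
def segs : List Char → List String → List Char → List String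
  | c :: cs, a :: as, cache =>
    if a = "s" then String.mk (cache ++ [c]) :: segs cs as []
    else segs cs as (cache ++ [c])
  | _, _, _ => []

theorem segs_nil_left (as : List String) (cache : List Char) : segs [] as cache = [] := by
  cases as <;> rfl

theorem segs_nil_right (cs : List Char) (cache : List Char) : segs cs [] cache = [] := by
  cases cs <;> rfl

-- A's fold equals segs
theorem foldA_eq_segs (cs : List Char) (as : List String) (sen : List String) (cache : List Char) :
    ((List.zip cs as).foldl
      (fun (st : List String × List Char) ca =>
        let cache := st.2 ++ [ca.1]
        if ca.2 = "s" then (st.1 ++ [String.mk cache], []) else (st.1, cache))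
      (sen, cache)).1 = sen ++ segs cs as cache := by
  induction cs generalizing as sen cache with
  | nil => simp [segs_nil_left]
  | cons c cs ih =>
    cases as with
    | nil => simp [segs_nil_right]
    | cons a as =>
      simp only [List.zip_cons_cons, List.foldl_cons, segs]
      by_cases h : a = "s" <;> simp [h, ih]

def cutsRel (cs : List Char) (as : List String) : List Nat :=
  (List.range (min cs.length as.length)).filter (fun i => as.getD i "" = "s")

theorem cutsRel_cons (c : Char) (cs : List Char) (a : String) (as : List String) :
    cutsRel (c :: cs) (a :: as)
      = (if a = "s" then [0] else []) ++ (cutsRel cs as).map (· + 1) := by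
  unfold cutsRel
  simp only [List.length_cons, Nat.succ_min_succ, List.range_succ_eq_map]
  by_cases h : a = "s" <;>
    simp [h, List.filter_map, Function.comp_def] <;> rfl

-- B's generalized loop: shifted cut indices recover segs with the pending cache
theorem bGo_eq_segs (cs : List Char) (as : List String) (cache : List Char)
    (full : List Char) (p : Nat) (hfull : full.drop p = cache ++ cs) :
    bGo full ((cutsRel cs as).map (fun j => j + (p + cache.length))) p = segs cs as cache := by
  induction cs generalizing as cache p with
  | nil => simp [cutsRel, segs_nil_left, bGo]
  | cons c cs ih =>
    cases as with
    | nil => simp [cutsRel, segs_nil_right, bGo]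
    | cons a as =>
      rw [cutsRel_cons]
      by_cases h : a = "s"
      · have hword : (full.drop p).take (cache.length + 1) = cache ++ [c] := by
          rw [hfull]
          rw [show cache ++ c :: cs = (cache ++ [c]) ++ cs by simp]
          rw [List.take_append_of_le_length (by simp)]
          simp
        have hdrop : full.drop (p + cache.length + 1) = cs := by
          have := congrArg (List.drop (cache.length + 1)) hfull
          rw [← List.drop_drop] at this
          simpa [Nat.add_comm, Nat.add_assoc, Nat.add_left_comm] using this
        have ihx : bGo full ((cutsRel cs as).map (fun j => j + (p + cache.length + 1)))
            (p + cache.length + 1) = segs cs as [] := by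
          simpa using ih as [] (p + cache.length + 1) (by simpa using hdrop)
        subst h
        simp only [segs]
        simp only [if_true, List.singleton_append, List.map_cons, List.map_map]
        simp only [bGo]
        congr 1
        · rw [show 0 + (p + cache.length) + 1 - p = cache.length + 1 by omega, hword]
        · rw [← ihx]
          congr 1
          · exact List.map_congr_left (fun j _ => by simp [Function.comp_def]; omega)
          · omega
      · have ihx := ih as (cache ++ [c]) p (by simpa using hfull)
        simp only [segs]
        rw [if_neg h, if_neg h, List.nil_append, List.map_map, ← ihx]
        congr 1
        exact List.map_congr_left (fun j _ => by simp [Function.comp_def]; omega)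

theorem alt_eq_segs (actions : List String) (raw : String) :
    actions_to_result_alt actions raw = segs raw.toList (actions.drop 1) [] := by
  unfold actions_to_result_alt
  have h := bGo_eq_segs raw.toList (actions.drop 1) [] raw.toList 0 (by simp)
  simpa [cutsRel] using h

-- ===== VERDICT (by name: the statement is the Claim_ definition above) =====
theorem actions_to_result_spec : Claim_equal_actions_to_result := by
  intro actions raw _
  unfold Spec_actions_to_result
  rw [alt_eq_segs]
  unfold actions_to_result
  simpa using foldA_eq_segs raw.toList (actions.drop 1) [] []
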